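-- pv_equiv track=rewrite | github.com/jmj617/leetcode | 2600-k-items-with-the-maximum-sum/2600-k-items-with-the-maximum-sum.py | kItemsWithMaximumSum
-- ===== SOURCE A (Python) =====
-- def kItemsWithMaximumSum(numOnes: int, numZeros: int, numNegOnes: int, k: int) -> int:
--     sum_num = 0
--     one = [1] * numOnes
--     zero = [0] * numZeros
--     nega = [-1] * numNegOnes
--     num_list = one + zero + nega
--     for i in range(k):
--         sum_num += num_list[i]
--     return sum_num
-- ===== SOURCE B (Python) =====
-- def kItemsWithMaximumSum(numOnes: int, numZeros: int, numNegOnes: int, k: int) -> int: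
--     ones = max(numOnes, 0)
--     zeros = max(numZeros, 0)
--     take = max(k, 0)
--     taken_ones = min(take, ones)
--     taken_neg = max(0, take - ones - zeros)
--     return taken_ones - taken_neg
-- ===== Notes on version B (the rewrite author's own statement) =====
-- stated objective: faster
-- what changed: Replaced materializing three lists and summing their first k elements in a loop by a closed-form O(1) computation: min(k,ones) ones are taken and max(0,k-ones-zeros) negative ones.
import Mathlib
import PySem

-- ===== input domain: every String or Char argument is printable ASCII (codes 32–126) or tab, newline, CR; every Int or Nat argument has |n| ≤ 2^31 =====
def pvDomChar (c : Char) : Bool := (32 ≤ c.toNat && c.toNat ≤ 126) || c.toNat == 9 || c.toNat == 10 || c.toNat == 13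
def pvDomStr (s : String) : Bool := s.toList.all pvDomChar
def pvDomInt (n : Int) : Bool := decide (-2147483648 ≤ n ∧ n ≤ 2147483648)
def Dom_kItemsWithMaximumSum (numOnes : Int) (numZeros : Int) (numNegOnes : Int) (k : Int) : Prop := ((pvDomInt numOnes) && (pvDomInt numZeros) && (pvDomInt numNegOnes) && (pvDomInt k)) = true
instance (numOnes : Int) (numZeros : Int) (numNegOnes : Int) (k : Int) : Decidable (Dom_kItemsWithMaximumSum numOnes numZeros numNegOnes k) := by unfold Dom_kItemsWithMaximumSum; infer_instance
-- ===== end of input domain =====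

-- B replaces A's list materialization and O(k) summing loop by closed-form O(1) arithmetic.

-- ===== PORT A =====
def kItemsWithMaximumSum (numOnes : Int) (numZeros : Int) (numNegOnes : Int) (k : Int) : Int :=
  let one := List.replicate numOnes.toNat (1 : Int)       -- [1] * numOnes (negative count gives [])
  let zero := List.replicate numZeros.toNat (0 : Int)
  let nega := List.replicate numNegOnes.toNat (-1 : Int)
  let numList := one ++ zero ++ nega
  (PySem.List.pyRange 0 k 1).foldl
    (fun sumNum i => sumNum + PySem.List.pyGetD numList i 0) 0

-- ===== PORT B =====
def kItemsWithMaximumSum_alt (numOnes : Int) (numZeros : Int) (numNegOnes : Int) (k : Int) : Int :=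
  let ones := max numOnes 0
  let zeros := max numZeros 0
  let take := max k 0
  let takenOnes := min take ones
  let takenNeg := max 0 (take - ones - zeros)
  takenOnes - takenNeg

-- ===== PRECONDITION & SPEC =====
-- Pre_ excludes exactly the inputs where A raises IndexError: k larger than the built list's length.
def Pre_kItemsWithMaximumSum (numOnes : Int) (numZeros : Int) (numNegOnes : Int) (k : Int) : Prop :=
  k ≤ max numOnes 0 + max numZeros 0 + max numNegOnes 0
instance (numOnes : Int) (numZeros : Int) (numNegOnes : Int) (k : Int) : Decidable (Pre_kItemsWithMaximumSum numOnes numZeros numNegOnes k) := by unfold Pre_kItemsWithMaximumSum; infer_instance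
def pvWitness_kItemsWithMaximumSum : Int × Int × Int × Int := (3, 2, 2, 5)

def Spec_kItemsWithMaximumSum (numOnes : Int) (numZeros : Int) (numNegOnes : Int) (k : Int) (out : Int) : Prop := out = kItemsWithMaximumSum_alt numOnes numZeros numNegOnes k
instance (numOnes : Int) (numZeros : Int) (numNegOnes : Int) (k : Int) (out : Int) : Decidable (Spec_kItemsWithMaximumSum numOnes numZeros numNegOnes k out) := by unfold Spec_kItemsWithMaximumSum; infer_instance

-- ===== CLAIM (what is proved, stated in full; the proofs are below) =====
def Claim_equal_kItemsWithMaximumSum : Prop := ∀ (numOnes : Int) (numZeros : Int) (numNegOnes : Int) (k : Int), Dom_kItemsWithMaximumSum numOnes numZeros numNegOnes k → Pre_kItemsWithMaximumSum numOnes numZeros numNegOnes k → Spec_kItemsWithMaximumSum numOnes numZeros numNegOnes k (kItemsWithMaximumSum numOnes numZeros numNegOnes k)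

-- ===== LEMMAS AND PROOFS =====

-- The i-th element of [1]*o ++ [0]*z ++ [-1]*n, for i in range.
lemma getL (o z n i : Nat) (h : i < o + z + n) :
    PySem.List.pyGetD (List.replicate o (1 : Int) ++ List.replicate z (0 : Int)
      ++ List.replicate n (-1 : Int)) (i : Int) 0
    = if i < o then 1 else if i < o + z then 0 else -1 := by
  rw [PySem.List.pyGetD_natCast]
  rw [List.getD_eq_getElem?_getD, List.getElem?_append, List.getElem?_append]
  simp only [List.length_replicate, List.getElem?_replicate]
  split_ifs <;> simp_all <;> omega

-- Sum of the first m elements of the list, closed form.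
lemma sumFirst (o z n m : Nat) (h : m ≤ o + z + n) :
    (PySem.List.pyRange 0 (m : Int) 1).foldl
      (fun s i => s + PySem.List.pyGetD (List.replicate o (1 : Int)
        ++ List.replicate z (0 : Int) ++ List.replicate n (-1 : Int)) i 0) 0
    = min (m : Int) o - max 0 ((m : Int) - o - z) := by
  induction m with
  | zero => simp [PySem.List.pyRange_one_eq_nil]
  | succ m ih =>
    have hm : m ≤ o + z + n := by omega
    rw [show ((↑(m + 1) : Int)) = (m : Int) + 1 by push_cast; ring]
    rw [PySem.List.pyRange_one_succ_right (by positivity)]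
    rw [List.foldl_append, ih hm]
    simp only [List.foldl_cons, List.foldl_nil]
    rw [getL o z n m (by omega)]
    split_ifs <;> omega

-- ===== VERDICT (by name: the statement is the Claim_ definition above) =====
theorem kItemsWithMaximumSum_spec : Claim_equal_kItemsWithMaximumSum := by
  intro numOnes numZeros numNegOnes k _ hpre
  unfold Spec_kItemsWithMaximumSum kItemsWithMaximumSum kItemsWithMaximumSum_alt
  dsimp only
  unfold Pre_kItemsWithMaximumSum at hpre
  by_cases hk : k ≤ 0
  · rw [PySem.List.pyRange_one_eq_nil hk]
    simp only [List.foldl_nil]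
    omega
  · have hk' : k = (k.toNat : Int) := by omega
    rw [hk']
    rw [sumFirst numOnes.toNat numZeros.toNat numNegOnes.toNat k.toNat (by omega)]
    have h1 : ((numOnes.toNat : Int)) = max numOnes 0 := by omega
    have h2 : ((numZeros.toNat : Int)) = max numZeros 0 := by omega
    have h3 : ((k.toNat : Int)) = max k 0 := by omega
    rw [h1, h2, h3]
    omega
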